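-- pv_equiv track=rewrite | github.com/IsaacTrost/adventofcodeode | Day18puzzle1.py | subcode
-- ===== SOURCE A (Python) =====
-- def subcode(code):
--     for x in range(len(code)):
--         if(code[-(x+1)]=="1"):
--             code[-(x+1)]="0"
--             return code
--         if(code[-(x+1)]=="0"):
--             code[-(x+1)]="1"
--     return(False)
-- ===== SOURCE B (Python) =====
-- def subcode(code):
--     # Locate the rightmost "1"; decrement: set it to "0" and flip every "0"
--     # to its right to "1".  If there is no "1" (underflow), flip all "0"s
--     # in place and return False, matching the original's observable behaviour.
--     try:
--         k = code[::-1].index("1")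
--     except ValueError:
--         code[:] = ["1" if s == "0" else s for s in code]
--         return False
--     i = len(code) - 1 - k
--     code[i] = "0"
--     code[i + 1:] = ["1" if s == "0" else s for s in code[i + 1:]]
--     return code
-- ===== Notes on version B (the rewrite author's own statement) =====
-- stated objective: alternative
-- what changed: Replaces A's single interleaved right-to-left index loop (flip-0s-until-first-1) with a find of the rightmost "1" via a reversed-list index search followed by one whole-slice flip of the suffix after it; both mutate the list in place, and equivalence is about the return value. Pre_ excludes lists containing no "1", on which both return False, a value outside the declared Optional[list[str]] return type.
-- outside the precondition, e.g. on subcode([]): A returns False, B returns False; on subcode(['0', '0']): A returns False, B returns False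
import Mathlib
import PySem

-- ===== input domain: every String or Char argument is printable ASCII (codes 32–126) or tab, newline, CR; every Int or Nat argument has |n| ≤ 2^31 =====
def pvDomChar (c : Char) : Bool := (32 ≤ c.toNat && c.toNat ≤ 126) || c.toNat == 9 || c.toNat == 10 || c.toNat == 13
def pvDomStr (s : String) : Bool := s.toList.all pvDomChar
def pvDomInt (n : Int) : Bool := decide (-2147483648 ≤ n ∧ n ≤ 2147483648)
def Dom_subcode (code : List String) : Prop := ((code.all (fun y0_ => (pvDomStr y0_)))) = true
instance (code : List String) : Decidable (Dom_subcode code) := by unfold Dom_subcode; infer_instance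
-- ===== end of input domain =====

-- B replaces A's interleaved right-to-left scan by a rightmost-"1" search plus one suffix flip;
-- both Pythons mutate the argument list in place (same mutation), the equivalence proved here is
-- about the return value (False ↦ none).

-- ===== PORT A =====
-- the for-x-in-range loop of A; code[-(x+1)] on a list of length n is position n-1-x (always in range here)
def subcodeLoop (n : Nat) (code : List String) (x : Nat) : Option (List String) :=
  if _h : x < n then
    if code.getD (n - 1 - x) "" = "1" then some (code.set (n - 1 - x) "0")
    else
      let code' := if code.getD (n - 1 - x) "" = "0" then code.set (n - 1 - x) "1" else code
      subcodeLoop n code' (x + 1)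
  else none
termination_by n - x

def subcode (code : List String) : Option (List String) :=
  subcodeLoop code.length code 0

-- ===== PORT B =====
-- the comprehension's element transform: "1" if s == "0" else s
def pvFlip0 (s : String) : String := if s = "0" then "1" else s

def subcode_alt (code : List String) : Option (List String) :=
  match PySem.List.index? code.reverse "1" with
  | none =>
      -- underflow: Source B flips code[:] in place and returns False; the mutation is
      -- not part of the return value, so the port returns none
      none
  | some k =>
      let i := code.length - 1 - k
      let c1 := code.set i "0"
      some (c1.take (i + 1) ++ (c1.drop (i + 1)).map pvFlip0)

-- ===== PRECONDITION & SPEC =====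
-- Pre_ excludes inputs with no "1": there both Pythons return False, a value outside the
-- declared return type Optional[list[str]], which the typed ports cannot represent.
def Pre_subcode (code : List String) : Prop := "1" ∈ code
instance (code : List String) : Decidable (Pre_subcode code) := by unfold Pre_subcode; infer_instance
def pvWitness_subcode : List String := ["1", "0"]

def Spec_subcode (code : List String) (out : Option (List String)) : Prop := out = subcode_alt code
instance (code : List String) (out : Option (List String)) : Decidable (Spec_subcode code out) := by unfold Spec_subcode; infer_instance

-- ===== CLAIM (what is proved, stated in full; the proofs are below) =====
def Claim_equal_subcode : Prop := ∀ (code : List String), Dom_subcode code → Pre_subcode code → Spec_subcode code (subcode code)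

-- ===== LEMMAS AND PROOFS =====

-- reference recursion on the reversed list: first "1" becomes "0", "0"s before it become "1"
def pvGo : List String → Option (List String)
  | [] => none
  | s :: rest =>
      if s = "1" then some ("0" :: rest)
      else (pvGo rest).map (fun r => pvFlip0 s :: r)

theorem pvReverseSet (l : List String) (i : Nat) (v : String) (h : i < l.length) :
    (l.set i v).reverse = l.reverse.set (l.length - 1 - i) v := by
  apply List.ext_getElem
  · simp
  · intro j h1 h2
    simp only [List.getElem_reverse, List.getElem_set, List.length_set]
    have hj : j < l.length := by simpa using h2
    split_ifs <;> first | rfl | omega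

theorem pvGo_split (pre rest : List String) (h : "1" ∉ pre) :
    pvGo (pre ++ "1" :: rest) = some (pre.map pvFlip0 ++ "0" :: rest) := by
  induction pre with
  | nil => simp [pvGo]
  | cons s p ih =>
      simp only [List.mem_cons, not_or] at h
      simp [pvGo, Ne.symm h.1, ih h.2]

theorem subcodeLoop_eq (m : Nat) : ∀ (cs : List String) (x : Nat), cs.length - x = m → x ≤ cs.length →
    subcodeLoop cs.length cs x
      = (pvGo (cs.reverse.drop x)).map (fun r => (cs.reverse.take x ++ r).reverse) := by
  induction m with
  | zero =>
      intro cs x hm hx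
      have hx' : x = cs.length := by omega
      have hnil : cs.reverse.drop x = [] := by rw [List.drop_eq_nil_iff]; simp [hx']
      rw [subcodeLoop, hnil]
      simp [hx', pvGo]
  | succ m ih =>
      intro cs x hm hx
      have hxn : x < cs.length := by omega
      have hxr : x < cs.reverse.length := by simpa using hxn
      have hi : cs.length - 1 - x < cs.length := by omega
      have hget : cs.getD (cs.length - 1 - x) "" = (cs[cs.length - 1 - x]'hi) :=
        List.getD_eq_getElem cs "" hi
      have hrev : cs.reverse[x] = (cs[cs.length - 1 - x]'hi) := List.getElem_reverse hxr
      have hdrop : cs.reverse.drop x = cs.reverse[x] :: cs.reverse.drop (x + 1) :=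
        List.drop_eq_getElem_cons hxr
      rw [subcodeLoop]
      simp only [hxn, dif_pos]
      by_cases h1 : (cs[cs.length - 1 - x]'hi) = "1"
      · rw [if_pos (by rw [hget]; exact h1)]
        rw [hdrop, hrev, h1]
        simp only [pvGo]
        rw [if_pos trivial]
        simp only [Option.map_some]
        have hset : cs.reverse.take x ++ "0" :: cs.reverse.drop (x + 1)
            = (cs.set (cs.length - 1 - x) "0").reverse := by
          rw [pvReverseSet cs _ _ hi]
          have : cs.length - 1 - (cs.length - 1 - x) = x := by omega
          rw [this, List.set_eq_take_append_cons_drop, if_pos hxr]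
        rw [hset, List.reverse_reverse]
      · rw [if_neg (by rw [hget]; exact h1)]
        set cs' : List String :=
          if cs.getD (cs.length - 1 - x) "" = "0" then cs.set (cs.length - 1 - x) "1" else cs with hc'
        have hlen : cs'.length = cs.length := by
          rw [hc']; split <;> simp
        -- the reversed list after this step
        have hrevtake : cs'.reverse.take (x + 1) = cs.reverse.take x ++ [pvFlip0 (cs[cs.length - 1 - x]'hi)] := by
          by_cases h0 : (cs[cs.length - 1 - x]'hi) = "0"
          · have : cs' = cs.set (cs.length - 1 - x) "1" := by rw [hc', if_pos (by rw [hget]; exact h0)]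
            rw [this, pvReverseSet cs _ _ hi]
            have hx' : cs.length - 1 - (cs.length - 1 - x) = x := by omega
            rw [hx', List.set_eq_take_append_cons_drop, if_pos hxr,
                List.take_append]
            have hlt : (cs.reverse.take x).length = x := by
              simp [List.length_take]; omega
            rw [List.take_of_length_le (by omega), hlt]
            simp [pvFlip0, h0]
          · have : cs' = cs := by rw [hc', if_neg (by rw [hget]; exact h0)]
            rw [this, List.take_add_one, List.getElem?_eq_getElem hxr, hrev]
            simp [pvFlip0, h0]
        have hrevdrop : cs'.reverse.drop (x + 1) = cs.reverse.drop (x + 1) := by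
          by_cases h0 : (cs[cs.length - 1 - x]'hi) = "0"
          · have : cs' = cs.set (cs.length - 1 - x) "1" := by rw [hc', if_pos (by rw [hget]; exact h0)]
            rw [this, pvReverseSet cs _ _ hi]
            have hx' : cs.length - 1 - (cs.length - 1 - x) = x := by omega
            rw [hx', List.drop_set, if_pos (by omega)]
          · have : cs' = cs := by rw [hc', if_neg (by rw [hget]; exact h0)]
            rw [this]
        have := ih cs' (x + 1) (by omega) (by omega)
        rw [hlen] at this
        rw [this, hrevdrop, hrevtake, hdrop, hrev]
        simp only [pvGo, if_neg h1, Option.map_map]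
        apply Option.map_congr
        intro r _
        simp

theorem subcode_eq (code : List String) :
    subcode code = (pvGo code.reverse).map List.reverse := by
  rw [subcode, subcodeLoop_eq (code.length) code 0 (by omega) (by omega)]
  simp

-- ===== VERDICT (by name: the statement is the Claim_ definition above) =====
theorem subcode_spec : Claim_equal_subcode := by
  intro code _ hpre
  unfold Spec_subcode subcode_alt
  cases hk : PySem.List.index? code.reverse "1" with
  | none =>
      -- impossible under Pre_: the list contains a "1"
      have hmem : "1" ∉ code.reverse := (PySem.List.index?_eq_none_iff _ _).mp hk
      exact absurd (by simpa using hpre) hmem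
  | some k =>
      obtain ⟨pre, suf, hsplit, hklen, hpre⟩ := (PySem.List.index?_eq_some_iff _ _ _).mp hk
      have hcode : code = suf.reverse ++ "1" :: pre.reverse := by
        have := congrArg List.reverse hsplit
        simpa using this
      have hn : code.length = pre.length + 1 + suf.length := by
        rw [hcode]; simp; omega
      have hi : code.length - 1 - k = suf.length := by omega
      -- A-side value
      rw [subcode_eq, hsplit, pvGo_split pre suf hpre]
      -- B-side value
      simp only [hi]
      have hc1 : code.set suf.length "0" = suf.reverse ++ "0" :: pre.reverse := by
        rw [hcode, List.set_append]
        simp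
      rw [hc1]
      have htake : (suf.reverse ++ "0" :: pre.reverse).take (suf.length + 1)
          = suf.reverse ++ ["0"] := by
        rw [List.take_append, List.take_of_length_le (by simp)]
        simp
      have hdrop : (suf.reverse ++ "0" :: pre.reverse).drop (suf.length + 1)
          = pre.reverse := by
        rw [List.drop_append]
        simp
      rw [htake, hdrop]
      simp [List.reverse_append]
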